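-- pv_equiv track=rewrite | github.com/xzn-sui/smart-schedule-optimizer | backend/import_courses.py | convert_days
-- ===== SOURCE A (Python) =====
-- def convert_days(days_str: str) -> str | None:
--     if not days_str or days_str.strip() == "":
--         return None
--     result = ""
--     i = 0
--     while i < len(days_str):
--         chunk = days_str[i:i+2]
--         if chunk == "Tu":
--             result += "T"; i += 2
--         elif chunk == "Th":
--             result += "R"; i += 2
--         elif chunk == "We":
--             result += "W"; i += 2
--         elif chunk == "Mo":
--             result += "M"; i += 2
--         elif chunk == "Fr":
--             result += "F"; i += 2
--         elif days_str[i] in "MWFT":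
--             result += days_str[i]; i += 1
--         else:
--             i += 1
--     return result if result else None
-- ===== SOURCE B (Python) =====
-- def convert_days(days_str):
--     if not days_str or days_str.strip() == "":
--         return None
--     # Five global replaces turn every two-letter abbreviation into its code
--     # ("Th" first, via a NUL sentinel so a produced 'R' is never confused with
--     # input text), then a single table-driven pass keeps only the code letters.
--     s = (days_str.replace("Th", "\x00")
--                  .replace("Tu", "T")
--                  .replace("We", "W")
--                  .replace("Mo", "M")
--                  .replace("Fr", "F"))
--     table = {"M": "M", "T": "T", "W": "W", "F": "F", "\x00": "R"}
--     out = "".join(table.get(c, "") for c in s)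
--     return out or None
-- ===== Notes on version B (the rewrite author's own statement) =====
-- stated objective: faster
-- what changed: Replaces the manual index state machine with five global str.replace passes (mapping 'Th' to a NUL sentinel so a produced code is never confused with input text) followed by a single table-lookup filter/join pass.
import Mathlib
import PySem

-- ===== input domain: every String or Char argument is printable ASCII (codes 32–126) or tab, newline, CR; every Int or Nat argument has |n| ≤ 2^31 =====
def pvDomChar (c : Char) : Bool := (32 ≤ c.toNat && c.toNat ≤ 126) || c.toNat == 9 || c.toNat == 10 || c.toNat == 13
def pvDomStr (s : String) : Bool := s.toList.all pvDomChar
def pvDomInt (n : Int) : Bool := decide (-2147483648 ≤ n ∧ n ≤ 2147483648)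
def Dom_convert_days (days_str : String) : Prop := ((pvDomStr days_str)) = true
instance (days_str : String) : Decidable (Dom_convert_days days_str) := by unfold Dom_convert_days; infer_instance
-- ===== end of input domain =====

-- B replaces A's index state machine by five global string replaces (Th via a NUL
-- sentinel) followed by one table-lookup filter pass; measurably faster in Python
-- (C-level str.replace) at the same O(n).

-- ===== PORT A =====
-- A's while-loop over the index i, ported as recursion on the remaining characters
-- with the accumulated result (result += x ~ acc ++ [x]).
def convGoA (l acc : List Char) : List Char :=
  match l with
  | [] => acc
  | c :: rest =>
    let chunk := List.take 2 (c :: rest)   -- days_str[i:i+2]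
    if chunk = ['T', 'u'] then convGoA (rest.drop 1) (acc ++ ['T'])
    else if chunk = ['T', 'h'] then convGoA (rest.drop 1) (acc ++ ['R'])
    else if chunk = ['W', 'e'] then convGoA (rest.drop 1) (acc ++ ['W'])
    else if chunk = ['M', 'o'] then convGoA (rest.drop 1) (acc ++ ['M'])
    else if chunk = ['F', 'r'] then convGoA (rest.drop 1) (acc ++ ['F'])
    else if c ∈ (['M', 'W', 'F', 'T'] : List Char) then convGoA rest (acc ++ [c])
    else convGoA rest acc
termination_by l.length
decreasing_by all_goals simp

def convert_days (days_str : String) : Option String :=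
  if days_str = "" ∨ PySem.Str.strip days_str = "" then none
  else
    let result := convGoA days_str.toList []
    if result = [] then none else some (String.ofList result)

-- ===== PORT B =====
-- Source B's table {'M':'M','T':'T','W':'W','F':'F','\x00':'R'}; keys are the
-- single characters produced by iterating the string, so Char keys here.
def tableB : PySem.Dict Char String :=
  PySem.Dict.ofList [('M', "M"), ('T', "T"), ('W', "W"), ('F', "F"), ('\x00', "R")]

def convert_days_alt (days_str : String) : Option String :=
  if days_str = "" ∨ PySem.Str.strip days_str = "" then none
  else
    let s := PySem.Str.replace (PySem.Str.replace (PySem.Str.replace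
              (PySem.Str.replace (PySem.Str.replace days_str "Th" "\x00")
                "Tu" "T") "We" "W") "Mo" "M") "Fr" "F"
    let out := PySem.Str.join "" (s.toList.map (fun c => PySem.Dict.getD tableB c ""))
    if out = "" then none else some out

-- ===== PRECONDITION & SPEC =====
def Spec_convert_days (days_str : String) (out : Option String) : Prop := out = convert_days_alt days_str
instance (days_str : String) (out : Option String) : Decidable (Spec_convert_days days_str out) := by unfold Spec_convert_days; infer_instance

-- ===== CLAIM (what is proved, stated in full; the proofs are below) =====
def Claim_equal_convert_days : Prop := ∀ (days_str : String), Dom_convert_days days_str → Spec_convert_days days_str (convert_days days_str)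

-- ===== LEMMAS AND PROOFS =====

-- One Python str.replace with a 2-char pattern and 1-char replacement, as plain
-- structural recursion.
def rep2 (x y z : Char) : List Char → List Char
  | [] => []
  | [c] => [c]
  | c :: d :: t => if c = x ∧ d = y then z :: rep2 x y z t else c :: rep2 x y z (d :: t)

-- B's replace chain and per-character table lookup, at the List Char level.
def gmap (c : Char) : List Char := (PySem.Dict.getD tableB c "").toList

def chainC (l : List Char) : List Char :=
  rep2 'F' 'r' 'F' (rep2 'M' 'o' 'M' (rep2 'W' 'e' 'W' (rep2 'T' 'u' 'T' (rep2 'T' 'h' '\x00' l))))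

def FF (l : List Char) : List Char := (chainC l).flatMap gmap

theorem rep2_go_eq (x y z : Char) (fuel : Nat) :
    ∀ (l acc : List Char), l.length ≤ fuel →
      PySem.Chars.replace.go [x, y] [z] fuel l acc = acc.reverse ++ rep2 x y z l := by
  induction fuel with
  | zero =>
    intro l acc h
    have hl : l = [] := List.eq_nil_of_length_eq_zero (Nat.le_zero.mp h)
    subst hl
    simp [PySem.Chars.replace.go, rep2]
  | succ n ih =>
    intro l acc h
    match l with
    | [] => simp [PySem.Chars.replace.go, rep2]
    | [c] =>
      have hpre : [x, y].isPrefixOf [c] = false := by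
        simp [List.isPrefixOf]
      rw [PySem.Chars.replace.go]
      simp only [hpre, if_false, Bool.false_eq_true]
      rw [ih [] (c :: acc) (by simp)]
      simp [rep2]
    | c :: d :: t =>
      rw [PySem.Chars.replace.go]
      by_cases hp : c = x ∧ d = y
      · have hpre : [x, y].isPrefixOf (c :: d :: t) = true := by
          simp [List.isPrefixOf, hp.1.symm, hp.2.symm]
        simp only [hpre, if_true]
        rw [show List.drop [x,y].length (c :: d :: t) = t by simp]
        rw [ih t ([z].reverse ++ acc) (by simp at h ⊢; omega)]
        simp [rep2, hp.1, hp.2]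
      · have hpre : [x, y].isPrefixOf (c :: d :: t) = false := by
          simp [List.isPrefixOf]
          intro hc hd
          exact hp ⟨hc.symm, hd.symm⟩
        simp only [hpre, Bool.false_eq_true, if_false]
        rw [ih (d :: t) (c :: acc) (by simp at h ⊢; omega)]
        have : ¬ (c = x ∧ d = y) := hp
        simp [rep2, this]

theorem rep2_eq_replace (x y z : Char) (l : List Char) :
    PySem.Chars.replace l [x, y] [z] = rep2 x y z l := by
  rw [PySem.Chars.replace]
  simp only [List.isEmpty_cons, if_false, Bool.false_eq_true]
  rw [rep2_go_eq x y z l.length l [] le_rfl]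
  simp

theorem rep2_cons_ne (x y z c : Char) (t : List Char) (h : c ≠ x) :
    rep2 x y z (c :: t) = c :: rep2 x y z t := by
  cases t <;> simp [rep2, h]

theorem rep2_cons_ne2 (x y z c d : Char) (t : List Char) (h : d ≠ y) :
    rep2 x y z (c :: d :: t) = c :: rep2 x y z (d :: t) := by
  simp [rep2, h]

theorem rep2_pair (x y z : Char) (t : List Char) :
    rep2 x y z (x :: y :: t) = z :: rep2 x y z t := by
  simp [rep2]

theorem rep2_head (x y z c : Char) (s : List Char) :
    (rep2 x y z (c :: s)).head? = some c ∨ (rep2 x y z (c :: s)).head? = some z := by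
  cases s with
  | nil => left; simp [rep2]
  | cons d t =>
    by_cases hp : c = x ∧ d = y
    · right; simp [rep2, hp.1, hp.2]
    · left; simp [rep2, hp]

theorem head?_rep2_ne (x y z a : Char) (t : List Char)
    (h : t.head? ≠ some a) (hz : z ≠ a) :
    (rep2 x y z t).head? ≠ some a := by
  cases t with
  | nil => simp [rep2]
  | cons c s =>
    rcases rep2_head x y z c s with h1 | h1 <;> rw [h1]
    · simpa using fun hca => h (by simp [hca])
    · simpa using hz

theorem rep2_cons_of_head_ne (x y z : Char) (m : List Char) (h : m.head? ≠ some y) :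
    rep2 x y z (x :: m) = x :: rep2 x y z m := by
  cases m with
  | nil => simp [rep2]
  | cons e s =>
    have he : e ≠ y := by simpa using h
    exact rep2_cons_ne2 x y z x e s he

theorem gmap_M : gmap 'M' = ['M'] := by decide
theorem gmap_T : gmap 'T' = ['T'] := by decide
theorem gmap_W : gmap 'W' = ['W'] := by decide
theorem gmap_F : gmap 'F' = ['F'] := by decide
theorem gmap_NUL : gmap '\x00' = ['R'] := by decide

theorem gmap_nil (c : Char) (hc : c ∉ (['M', 'W', 'F', 'T'] : List Char)) (h0 : c ≠ '\x00') :
    gmap c = [] := by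
  have ht : tableB = PySem.Dict.mk [('M', "M"), ('T', "T"), ('W', "W"), ('F', "F"), ('\x00', "R")] := by
    decide
  unfold gmap
  rw [PySem.Dict.getD_of_not_contains]
  · rfl
  · rw [ht, PySem.Dict.contains_mk]
    simp only [List.mem_cons, List.mem_singleton, not_or] at hc
    obtain ⟨hM, hW, hF, hT, -⟩ := hc
    simp only [List.any_cons, List.any_nil, Bool.or_false, Bool.or_eq_false_iff, beq_eq_false_iff_ne, ne_eq]
    refine ⟨fun h => hM h.symm, fun h => hT h.symm, fun h => hW h.symm, fun h => hF h.symm, fun h => h0 h.symm⟩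

theorem FF_nil : FF [] = [] := by decide

theorem FF_Tu (t : List Char) : FF ('T' :: 'u' :: t) = 'T' :: FF t := by
  unfold FF chainC
  rw [rep2_cons_ne2 'T' 'h' '\x00' 'T' 'u' t (by decide),
      rep2_cons_ne 'T' 'h' '\x00' 'u' t (by decide),
      rep2_pair 'T' 'u' 'T',
      rep2_cons_ne 'W' 'e' 'W' 'T' _ (by decide),
      rep2_cons_ne 'M' 'o' 'M' 'T' _ (by decide),
      rep2_cons_ne 'F' 'r' 'F' 'T' _ (by decide)]
  simp [gmap_T]

theorem FF_Th (t : List Char) : FF ('T' :: 'h' :: t) = 'R' :: FF t := by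
  unfold FF chainC
  rw [rep2_pair 'T' 'h' '\x00',
      rep2_cons_ne 'T' 'u' 'T' '\x00' _ (by decide),
      rep2_cons_ne 'W' 'e' 'W' '\x00' _ (by decide),
      rep2_cons_ne 'M' 'o' 'M' '\x00' _ (by decide),
      rep2_cons_ne 'F' 'r' 'F' '\x00' _ (by decide)]
  simp [gmap_NUL]

theorem FF_We (t : List Char) : FF ('W' :: 'e' :: t) = 'W' :: FF t := by
  unfold FF chainC
  rw [rep2_cons_ne 'T' 'h' '\x00' 'W' _ (by decide),
      rep2_cons_ne 'T' 'h' '\x00' 'e' t (by decide),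
      rep2_cons_ne 'T' 'u' 'T' 'W' _ (by decide),
      rep2_cons_ne 'T' 'u' 'T' 'e' _ (by decide),
      rep2_pair 'W' 'e' 'W',
      rep2_cons_ne 'M' 'o' 'M' 'W' _ (by decide),
      rep2_cons_ne 'F' 'r' 'F' 'W' _ (by decide)]
  simp [gmap_W]

theorem FF_Mo (t : List Char) : FF ('M' :: 'o' :: t) = 'M' :: FF t := by
  unfold FF chainC
  rw [rep2_cons_ne 'T' 'h' '\x00' 'M' _ (by decide),
      rep2_cons_ne 'T' 'h' '\x00' 'o' t (by decide),
      rep2_cons_ne 'T' 'u' 'T' 'M' _ (by decide),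
      rep2_cons_ne 'T' 'u' 'T' 'o' _ (by decide),
      rep2_cons_ne 'W' 'e' 'W' 'M' _ (by decide),
      rep2_cons_ne 'W' 'e' 'W' 'o' _ (by decide),
      rep2_pair 'M' 'o' 'M',
      rep2_cons_ne 'F' 'r' 'F' 'M' _ (by decide)]
  simp [gmap_M]

theorem FF_T (t : List Char) (h1 : t.head? ≠ some 'u') (h2 : t.head? ≠ some 'h') :
    FF ('T' :: t) = 'T' :: FF t := by
  have h1' := head?_rep2_ne 'T' 'h' '\x00' 'u' t h1 (by decide)
  unfold FF chainC
  rw [rep2_cons_of_head_ne 'T' 'h' '\x00' t h2,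
      rep2_cons_of_head_ne 'T' 'u' 'T' _ h1',
      rep2_cons_ne 'W' 'e' 'W' 'T' _ (by decide),
      rep2_cons_ne 'M' 'o' 'M' 'T' _ (by decide),
      rep2_cons_ne 'F' 'r' 'F' 'T' _ (by decide)]
  simp [gmap_T]

theorem FF_Fr (t : List Char) : FF ('F' :: 'r' :: t) = 'F' :: FF t := by
  unfold FF chainC
  rw [rep2_cons_ne 'T' 'h' '\x00' 'F' _ (by decide),
      rep2_cons_ne 'T' 'h' '\x00' 'r' t (by decide),
      rep2_cons_ne 'T' 'u' 'T' 'F' _ (by decide),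
      rep2_cons_ne 'T' 'u' 'T' 'r' _ (by decide),
      rep2_cons_ne 'W' 'e' 'W' 'F' _ (by decide),
      rep2_cons_ne 'W' 'e' 'W' 'r' _ (by decide),
      rep2_cons_ne 'M' 'o' 'M' 'F' _ (by decide),
      rep2_cons_ne 'M' 'o' 'M' 'r' _ (by decide),
      rep2_pair 'F' 'r' 'F']
  simp [gmap_F]

theorem FF_W (t : List Char) (h : t.head? ≠ some 'e') : FF ('W' :: t) = 'W' :: FF t := by
  have h' := head?_rep2_ne 'T' 'u' 'T' 'e' _ (head?_rep2_ne 'T' 'h' '\x00' 'e' t h (by decide)) (by decide)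
  unfold FF chainC
  rw [rep2_cons_ne 'T' 'h' '\x00' 'W' t (by decide),
      rep2_cons_ne 'T' 'u' 'T' 'W' _ (by decide),
      rep2_cons_of_head_ne 'W' 'e' 'W' _ h',
      rep2_cons_ne 'M' 'o' 'M' 'W' _ (by decide),
      rep2_cons_ne 'F' 'r' 'F' 'W' _ (by decide)]
  simp [gmap_W]

theorem FF_M (t : List Char) (h : t.head? ≠ some 'o') : FF ('M' :: t) = 'M' :: FF t := by
  have h' := head?_rep2_ne 'W' 'e' 'W' 'o' _ (head?_rep2_ne 'T' 'u' 'T' 'o' _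
    (head?_rep2_ne 'T' 'h' '\x00' 'o' t h (by decide)) (by decide)) (by decide)
  unfold FF chainC
  rw [rep2_cons_ne 'T' 'h' '\x00' 'M' t (by decide),
      rep2_cons_ne 'T' 'u' 'T' 'M' _ (by decide),
      rep2_cons_ne 'W' 'e' 'W' 'M' _ (by decide),
      rep2_cons_of_head_ne 'M' 'o' 'M' _ h',
      rep2_cons_ne 'F' 'r' 'F' 'M' _ (by decide)]
  simp [gmap_M]

theorem FF_F (t : List Char) (h : t.head? ≠ some 'r') : FF ('F' :: t) = 'F' :: FF t := by
  have h' := head?_rep2_ne 'M' 'o' 'M' 'r' _ (head?_rep2_ne 'W' 'e' 'W' 'r' _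
    (head?_rep2_ne 'T' 'u' 'T' 'r' _
      (head?_rep2_ne 'T' 'h' '\x00' 'r' t h (by decide)) (by decide)) (by decide)) (by decide)
  unfold FF chainC
  rw [rep2_cons_ne 'T' 'h' '\x00' 'F' t (by decide),
      rep2_cons_ne 'T' 'u' 'T' 'F' _ (by decide),
      rep2_cons_ne 'W' 'e' 'W' 'F' _ (by decide),
      rep2_cons_ne 'M' 'o' 'M' 'F' _ (by decide),
      rep2_cons_of_head_ne 'F' 'r' 'F' _ h']
  simp [gmap_F]

theorem FF_skip (c : Char) (t : List Char) (hc : c ∉ (['M', 'W', 'F', 'T'] : List Char))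
    (h0 : c ≠ '\x00') : FF (c :: t) = FF t := by
  have hM : c ≠ 'M' := fun h => hc (by simp [h])
  have hW : c ≠ 'W' := fun h => hc (by simp [h])
  have hF : c ≠ 'F' := fun h => hc (by simp [h])
  have hT : c ≠ 'T' := fun h => hc (by simp [h])
  unfold FF chainC
  rw [rep2_cons_ne 'T' 'h' '\x00' c t hT,
      rep2_cons_ne 'T' 'u' 'T' c _ hT,
      rep2_cons_ne 'W' 'e' 'W' c _ hW,
      rep2_cons_ne 'M' 'o' 'M' c _ hM,
      rep2_cons_ne 'F' 'r' 'F' c _ hF]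
  simp [gmap_nil c hc h0]

theorem goA_eq (n : Nat) : ∀ (l acc : List Char), l.length ≤ n → '\x00' ∉ l →
    convGoA l acc = acc ++ FF l := by
  induction n with
  | zero =>
    intro l acc h _
    have hl : l = [] := List.eq_nil_of_length_eq_zero (Nat.le_zero.mp h)
    subst hl
    simp [convGoA, FF_nil]
  | succ n ih =>
    intro l acc h hnul
    match l with
    | [] => simp [convGoA, FF_nil]
    | [c] =>
      have hc0 : c ≠ '\x00' := by simp at hnul; exact fun h' => hnul h'.symm
      rw [convGoA]
      simp only [List.take, List.drop]
      by_cases hm : c ∈ (['M', 'W', 'F', 'T'] : List Char)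
      · have hm' : c = 'M' ∨ c = 'W' ∨ c = 'F' ∨ c = 'T' := by simpa using hm
        have hFFc : FF [c] = [c] := by
          rcases hm' with rfl | rfl | rfl | rfl <;> decide
        simp only [show ¬([c] = ['T','u']) from by simp_all, show ¬([c] = ['T','h']) from by simp_all,
          show ¬([c] = ['W','e']) from by simp_all, show ¬([c] = ['M','o']) from by simp_all,
          show ¬([c] = ['F','r']) from by simp_all, if_false, hm, if_true]
        rw [convGoA]
        rw [hFFc]
      · have hFFc : FF [c] = [] := (FF_skip c [] hm hc0).trans FF_nil
        simp only [show ¬([c] = ['T','u']) from by simp_all, show ¬([c] = ['T','h']) from by simp_all,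
          show ¬([c] = ['W','e']) from by simp_all, show ¬([c] = ['M','o']) from by simp_all,
          show ¬([c] = ['F','r']) from by simp_all, if_false, hm]
        rw [convGoA]
        simp [hFFc]
    | c :: d :: t =>
      have hc0 : c ≠ '\x00' := fun h' => hnul (by simp [h'])
      have hlen : t.length ≤ n := by simp at h; omega
      have hlen1 : (d :: t).length ≤ n := by simp at h ⊢; omega
      have hnt : '\x00' ∉ t := fun h' => hnul (by simp [h'])
      have hndt : '\x00' ∉ d :: t := fun h' => hnul (by simp; tauto)
      rw [convGoA]
      simp only [List.take_succ_cons, List.take_zero, List.drop_succ_cons, List.drop_zero]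
      split_ifs with hTu hTh hWe hMo hFr hm
      · obtain ⟨rfl, rfl⟩ : c = 'T' ∧ d = 'u' := by simpa using hTu
        rw [ih t _ hlen hnt, FF_Tu]
        simp
      · obtain ⟨rfl, rfl⟩ : c = 'T' ∧ d = 'h' := by simpa using hTh
        rw [ih t _ hlen hnt, FF_Th]
        simp
      · obtain ⟨rfl, rfl⟩ : c = 'W' ∧ d = 'e' := by simpa using hWe
        rw [ih t _ hlen hnt, FF_We]
        simp
      · obtain ⟨rfl, rfl⟩ : c = 'M' ∧ d = 'o' := by simpa using hMo
        rw [ih t _ hlen hnt, FF_Mo]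
        simp
      · obtain ⟨rfl, rfl⟩ : c = 'F' ∧ d = 'r' := by simpa using hFr
        rw [ih t _ hlen hnt, FF_Fr]
        simp
      · rw [ih (d :: t) _ hlen1 hndt]
        have hm' : c = 'M' ∨ c = 'W' ∨ c = 'F' ∨ c = 'T' := by simpa using hm
        rcases hm' with rfl | rfl | rfl | rfl
        · rw [FF_M (d :: t) (by simp; intro h'; exact hMo (by simp [h']))]
          simp
        · rw [FF_W (d :: t) (by simp; intro h'; exact hWe (by simp [h']))]
          simp
        · rw [FF_F (d :: t) (by simp; intro h'; exact hFr (by simp [h']))]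
          simp
        · rw [FF_T (d :: t) (by simp; intro h'; exact hTu (by simp [h'])) (by simp; intro h'; exact hTh (by simp [h']))]
          simp
      · rw [ih (d :: t) _ hlen1 hndt, FF_skip c (d :: t) hm hc0]

theorem join_empty_sep (L : List (List Char)) : PySem.Chars.join [] L = L.flatten := by
  simp only [PySem.Chars.join, List.intercalate]
  induction L with
  | nil => rfl
  | cons a L ih =>
    cases L with
    | nil => rfl
    | cons b M => simp_all [List.intersperse]

-- ===== VERDICT (by name: the statement is the Claim_ definition above) =====
theorem convert_days_spec : Claim_equal_convert_days := by
  unfold Claim_equal_convert_days Spec_convert_days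
  intro ds hdom
  unfold convert_days convert_days_alt
  by_cases hg : ds = "" ∨ PySem.Str.strip ds = ""
  · simp [hg]
  · have hnul : '\x00' ∉ ds.toList := by
      intro hmem
      unfold Dom_convert_days pvDomStr at hdom
      have := List.all_eq_true.mp hdom _ hmem
      exact absurd this (by decide)
    have hA : convGoA ds.toList [] = FF ds.toList := by
      simpa using goA_eq ds.toList.length ds.toList [] le_rfl hnul
    have hs : (PySem.Str.replace (PySem.Str.replace (PySem.Str.replace
              (PySem.Str.replace (PySem.Str.replace ds "Th" "\x00")
                "Tu" "T") "We" "W") "Mo" "M") "Fr" "F").toList = chainC ds.toList := by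
      simp only [PySem.Str.toList_replace]
      rw [show ("Th".toList) = ['T', 'h'] from rfl, show ("Tu".toList) = ['T', 'u'] from rfl,
          show ("We".toList) = ['W', 'e'] from rfl, show ("Mo".toList) = ['M', 'o'] from rfl,
          show ("Fr".toList) = ['F', 'r'] from rfl, show ("\x00".toList) = ['\x00'] from rfl,
          show ("T".toList) = ['T'] from rfl, show ("W".toList) = ['W'] from rfl,
          show ("M".toList) = ['M'] from rfl, show ("F".toList) = ['F'] from rfl]
      rw [rep2_eq_replace, rep2_eq_replace, rep2_eq_replace, rep2_eq_replace, rep2_eq_replace]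
      rfl
    have hout : (PySem.Str.join "" ((PySem.Str.replace (PySem.Str.replace (PySem.Str.replace
              (PySem.Str.replace (PySem.Str.replace ds "Th" "\x00")
                "Tu" "T") "We" "W") "Mo" "M") "Fr" "F").toList.map
                  (fun c => PySem.Dict.getD tableB c ""))).toList = FF ds.toList := by
      rw [PySem.Str.toList_join, show ("".toList) = ([] : List Char) from rfl, join_empty_sep]
      rw [List.map_map, hs]
      unfold FF
      rw [List.flatMap_def]
      rfl
    simp only [hg, if_false]
    rw [hA]
    by_cases hempty : FF ds.toList = []
    · have hB : PySem.Str.join "" ((PySem.Str.replace (PySem.Str.replace (PySem.Str.replace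
              (PySem.Str.replace (PySem.Str.replace ds "Th" "\x00")
                "Tu" "T") "We" "W") "Mo" "M") "Fr" "F").toList.map
                  (fun c => PySem.Dict.getD tableB c "")) = "" := by
        rw [← String.toList_inj, hout, hempty]; rfl
      rw [if_pos hempty, if_pos hB]
    · have hB : PySem.Str.join "" ((PySem.Str.replace (PySem.Str.replace (PySem.Str.replace
              (PySem.Str.replace (PySem.Str.replace ds "Th" "\x00")
                "Tu" "T") "We" "W") "Mo" "M") "Fr" "F").toList.map
                  (fun c => PySem.Dict.getD tableB c "")) ≠ "" := by
        intro h'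
        apply hempty
        rw [← hout, h']
        rfl
      rw [if_neg hempty, if_neg hB, ← hout, String.ofList_toList]
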